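-- pv_equiv track=rewrite | github.com/YangLingSanShan/Code-Check | test_codes/test2/4.py | evaluate_sequence
-- ===== SOURCE A (Python) =====
-- def evaluate_sequence(seq):
--     lookup = {0: 1}
--     mod_value = 10 ** 9 + 7
--     answer = 0
--     running_total = 0
--     for position, digit in enumerate(seq):
--         if digit == '1':
--             running_total -= 1
--         else:
--             running_total += 1
--
--         answer = (answer + (len(seq) - position) * lookup.get(running_total, 0)) % mod_value
--         lookup[running_total] = lookup.get(running_total, 0) + position + 2
--
--     return answer
-- ===== SOURCE B (Python) =====
-- def evaluate_sequence(seq):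
--     # Explicit prefix-sum array with a virtual seed P[0]=0, then a double loop
--     # over all index pairs i < j with equal prefix totals, weighting each pair
--     # by (i + 1) * (n - j + 1), reduced mod 1e9+7 term by term.
--     mod_value = 10 ** 9 + 7
--     n = len(seq)
--     prefixes = [0]
--     total = 0
--     for ch in seq:
--         total += -1 if ch == '1' else 1
--         prefixes.append(total)
--     answer = 0
--     for j in range(1, n + 1):
--         for i in range(j):
--             if prefixes[i] == prefixes[j]:
--                 answer = (answer + (i + 1) * (n - j + 1)) % mod_value
--     return answer
-- ===== Notes on version B (the rewrite author's own statement) =====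
-- stated objective: alternative
-- what changed: Replaces A's single-pass accumulation in a dict of prefix-total weights by an explicit prefix-total array with a virtual seed P[0]=0 and a double loop over all index pairs i<j with equal prefix totals, adding (i+1)*(n-j+1) per pair mod 1e9+7.
import Mathlib
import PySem

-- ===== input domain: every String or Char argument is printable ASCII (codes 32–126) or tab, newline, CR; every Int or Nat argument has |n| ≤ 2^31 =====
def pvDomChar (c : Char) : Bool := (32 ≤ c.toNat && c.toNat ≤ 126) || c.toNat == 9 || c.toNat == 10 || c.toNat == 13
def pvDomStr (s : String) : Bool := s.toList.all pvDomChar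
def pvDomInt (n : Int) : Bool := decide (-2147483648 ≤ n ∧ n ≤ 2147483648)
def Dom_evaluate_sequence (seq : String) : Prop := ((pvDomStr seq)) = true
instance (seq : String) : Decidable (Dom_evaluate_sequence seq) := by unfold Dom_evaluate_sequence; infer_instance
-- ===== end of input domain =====

-- B replaces A's one-pass dict-of-weights accumulation by an explicit prefix-total
-- array and a double loop over index pairs with equal prefix totals (alternative
-- structure, not faster).

-- ===== PORT A =====
-- loop body of A's for-loop (state: lookup, answer, running_total; pd = (position, digit))
def pvStepA (N : Int) (st : PySem.Dict Int Int × Int × Int) (pd : Int × Char) :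
    PySem.Dict Int Int × Int × Int :=
  let rt := if pd.2 = '1' then st.2.2 - 1 else st.2.2 + 1
  let ans := PySem.Int.mod (st.2.1 + (N - pd.1) * (st.1.getD rt 0)) (10 ^ 9 + 7)
  (st.1.insert rt (st.1.getD rt 0 + pd.1 + 2), ans, rt)

def evaluate_sequence (seq : String) : Int :=
  ((PySem.List.enumerate seq.toList 0).foldl
      (pvStepA (seq.toList.length : Int))
      (PySem.Dict.empty.insert 0 1, 0, 0)).2.1

-- ===== PORT B =====
-- loop body building the prefix-total list (state: list so far, running total)
def pvStepPfx (acc : List Int × Int) (ch : Char) : List Int × Int :=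
  let t := acc.2 + (if ch = '1' then -1 else 1)
  (acc.1 ++ [t], t)

-- inner 'for i in range(j)' loop of B (indices i, j are always in range of prefixes)
def pvInnerB (prefixes : List Int) (N : Int) (j : Int) (answer : Int) : Int :=
  (PySem.List.pyRange 0 j 1).foldl
    (fun a i =>
      if PySem.List.pyGetD prefixes i 0 = PySem.List.pyGetD prefixes j 0 then
        PySem.Int.mod (a + (i + 1) * (N - j + 1)) (10 ^ 9 + 7)
      else a)
    answer

def evaluate_sequence_alt (seq : String) : Int :=
  let cs := seq.toList
  let n : Int := (cs.length : Int)
  let prefixes := (cs.foldl pvStepPfx ([0], 0)).1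
  (PySem.List.pyRange 1 (n + 1) 1).foldl (fun answer j => pvInnerB prefixes n j answer) 0

-- ===== PRECONDITION & SPEC =====
def Spec_evaluate_sequence (seq : String) (out : Int) : Prop := out = evaluate_sequence_alt seq
instance (seq : String) (out : Int) : Decidable (Spec_evaluate_sequence seq out) := by unfold Spec_evaluate_sequence; infer_instance

-- ===== CLAIM (what is proved, stated in full; the proofs are below) =====
def Claim_equal_evaluate_sequence : Prop := ∀ (seq : String), Dom_evaluate_sequence seq → Spec_evaluate_sequence seq (evaluate_sequence seq)

-- ===== LEMMAS AND PROOFS =====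

-- value of one character in the running total
def pvVal (c : Char) : Int := if c = '1' then -1 else 1
-- prefix total after k characters (pvPref cs 0 = 0, the virtual seed)
def pvPref (cs : List Char) (k : ℕ) : Int := ((cs.take k).map pvVal).sum
-- total weight of earlier equal prefixes
def pvW (cs : List Char) (j : ℕ) : Int :=
  ∑ i ∈ Finset.range j, if pvPref cs i = pvPref cs j then (i : Int) + 1 else 0
-- the common un-reduced sum after k steps, A's grouping
def pvS (cs : List Char) (k : ℕ) : Int :=
  ∑ j ∈ Finset.range k, ((cs.length : Int) - j) * pvW cs (j + 1)
-- the same sum, B's grouping (pairwise terms)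
def pvSB (cs : List Char) (m : ℕ) : Int :=
  ∑ j ∈ Finset.range m, ∑ i ∈ Finset.range (j + 1),
    if pvPref cs i = pvPref cs (j + 1) then ((i : Int) + 1) * ((cs.length : Int) - ((j : Int) + 1) + 1) else 0

lemma pvmod_add (s b : Int) :
    PySem.Int.mod (PySem.Int.mod s (10 ^ 9 + 7) + b) (10 ^ 9 + 7) = PySem.Int.mod (s + b) (10 ^ 9 + 7) := by
  rw [PySem.Int.mod_eq_emod_of_pos (by norm_num), PySem.Int.mod_eq_emod_of_pos (by norm_num),
      PySem.Int.mod_eq_emod_of_pos (by norm_num), Int.emod_add_emod]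

lemma pvTake_succ (cs : List Char) (k : ℕ) (h : k < cs.length) :
    cs.take (k + 1) = cs.take k ++ [cs[k]] := by
  rw [← List.take_concat_get h, List.concat_eq_append]

lemma pvPref_succ (cs : List Char) (k : ℕ) (h : k < cs.length) :
    pvPref cs (k + 1) = pvPref cs k + pvVal cs[k] := by
  unfold pvPref
  rw [pvTake_succ cs k h, List.map_append, List.sum_append]
  simp

lemma pvS_succ (cs : List Char) (k : ℕ) :
    pvS cs (k + 1) = pvS cs k + ((cs.length : Int) - k) * pvW cs (k + 1) := by
  unfold pvS
  rw [Finset.sum_range_succ]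

lemma pvSB_succ (cs : List Char) (m : ℕ) :
    pvSB cs (m + 1) = pvSB cs m + ∑ i ∈ Finset.range (m + 1),
      (if pvPref cs i = pvPref cs (m + 1) then ((i : Int) + 1) * ((cs.length : Int) - ((m : Int) + 1) + 1) else 0) := by
  unfold pvSB
  rw [Finset.sum_range_succ]

lemma pvFoldA (cs : List Char) (k : ℕ) (hk : k ≤ cs.length) :
    ∃ D : PySem.Dict Int Int,
      (PySem.List.enumerate (cs.take k) 0).foldl (pvStepA (cs.length : Int))
          (PySem.Dict.empty.insert 0 1, 0, 0)
        = (D, PySem.Int.mod (pvS cs k) (10 ^ 9 + 7), pvPref cs k)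
      ∧ ∀ v : Int, D.getD v 0
          = ∑ i ∈ Finset.range (k + 1), if pvPref cs i = v then (i : Int) + 1 else 0 := by
  induction k with
  | zero =>
    refine ⟨PySem.Dict.empty.insert 0 1, ?_, ?_⟩
    · simp [PySem.List.enumerate_nil, pvS, pvPref]
    · intro v
      simp [PySem.Dict.getD_insert, pvPref, eq_comm]
  | succ k ih =>
    have hk' : k < cs.length := hk
    obtain ⟨D, hst, hD⟩ := ih (le_of_lt hk')
    have hlen : (cs.take k).length = k := List.length_take_of_le (le_of_lt hk')
    have hrt : (if cs[k] = '1' then pvPref cs k - 1 else pvPref cs k + 1) = pvPref cs (k + 1) := by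
      rw [pvPref_succ cs k hk']; unfold pvVal; split_ifs <;> ring
    have hW : D.getD (pvPref cs (k + 1)) 0 = pvW cs (k + 1) := by rw [hD]; rfl
    refine ⟨D.insert (pvPref cs (k + 1)) (D.getD (pvPref cs (k + 1)) 0 + (k : Int) + 2), ?_, ?_⟩
    · rw [pvTake_succ cs k hk', PySem.List.enumerate_append, List.foldl_append, hst]
      simp only [hlen, PySem.List.enumerate_cons, PySem.List.enumerate_nil,
        List.foldl_cons, List.foldl_nil, zero_add]
      unfold pvStepA
      simp only [hrt]
      refine congrArg₂ Prod.mk rfl (congrArg₂ Prod.mk ?_ rfl)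
      rw [hW, pvmod_add, pvS_succ]
    · intro v
      rw [PySem.Dict.getD_insert, Finset.sum_range_succ]
      by_cases hv : v = pvPref cs (k + 1)
      · rw [if_pos hv, hD, hv, if_pos rfl]
        push_cast; ring
      · rw [if_neg hv, hD, if_neg (fun h => hv h.symm), add_zero]

lemma pvA_eq (seq : String) :
    evaluate_sequence seq = PySem.Int.mod (pvS seq.toList seq.toList.length) (10 ^ 9 + 7) := by
  obtain ⟨D, hst, -⟩ := pvFoldA seq.toList seq.toList.length le_rfl
  rw [List.take_length] at hst
  unfold evaluate_sequence
  rw [hst]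

lemma pvFoldPfx (cs : List Char) (k : ℕ) (hk : k ≤ cs.length) :
    (cs.take k).foldl pvStepPfx ([0], 0)
      = ((List.range (k + 1)).map (pvPref cs), pvPref cs k) := by
  induction k with
  | zero => simp [pvPref]
  | succ k ih =>
    have hk' : k < cs.length := hk
    rw [pvTake_succ cs k hk', List.foldl_append, ih (le_of_lt hk')]
    simp only [List.foldl_cons, List.foldl_nil]
    unfold pvStepPfx
    have : pvPref cs k + (if cs[k] = '1' then (-1 : Int) else 1) = pvPref cs (k + 1) := by
      rw [pvPref_succ cs k hk']; rfl
    rw [List.range_succ (n := k + 1)]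
    simp [this]

lemma pvGetPfx (cs : List Char) (i : ℤ) (h0 : 0 ≤ i) (h1 : i < (cs.length : Int) + 1) :
    PySem.List.pyGetD ((List.range (cs.length + 1)).map (pvPref cs)) i 0 = pvPref cs i.toNat := by
  rw [PySem.List.pyGetD_eq_getElem _ _ h0 (by simp; omega)]
  simp

lemma pvInner_eq (cs : List Char) (j : ℤ) (h0 : 0 < j) (hj : j ≤ (cs.length : Int)) (s : Int) :
    pvInnerB ((List.range (cs.length + 1)).map (pvPref cs)) (cs.length : Int) j
        (PySem.Int.mod s (10 ^ 9 + 7))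
      = PySem.Int.mod
          (s + ∑ i ∈ Finset.range j.toNat,
            if pvPref cs i = pvPref cs j.toNat then ((i : Int) + 1) * ((cs.length : Int) - j + 1) else 0)
          (10 ^ 9 + 7) := by
  obtain ⟨jn, rfl⟩ : ∃ jn : ℕ, j = (jn : ℤ) := ⟨j.toNat, (Int.toNat_of_nonneg (le_of_lt h0)).symm⟩
  unfold pvInnerB
  simp only [Int.toNat_natCast]
  suffices H : ∀ (m : ℕ), m ≤ jn →
      (PySem.List.pyRange 0 (m : ℤ) 1).foldl
        (fun a i =>
          if PySem.List.pyGetD ((List.range (cs.length + 1)).map (pvPref cs)) i 0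
              = PySem.List.pyGetD ((List.range (cs.length + 1)).map (pvPref cs)) ((jn : ℤ)) 0 then
            PySem.Int.mod (a + (i + 1) * ((cs.length : Int) - (jn : ℤ) + 1)) (10 ^ 9 + 7)
          else a)
        (PySem.Int.mod s (10 ^ 9 + 7))
      = PySem.Int.mod
          (s + ∑ i ∈ Finset.range m,
            if pvPref cs i = pvPref cs jn then ((i : Int) + 1) * ((cs.length : Int) - (jn : ℤ) + 1) else 0)
          (10 ^ 9 + 7) by
    exact H jn le_rfl
  intro m hm
  induction m with
  | zero =>
    rw [PySem.List.pyRange_one_eq_nil (by norm_num)]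
    simp
  | succ m ihm =>
    have hcast : ((m + 1 : ℕ) : ℤ) = (m : ℤ) + 1 := by push_cast; ring
    rw [hcast, PySem.List.pyRange_one_succ_right (by omega), List.foldl_append,
        ihm (by omega)]
    simp only [List.foldl_cons, List.foldl_nil]
    rw [pvGetPfx cs (m : ℤ) (by omega) (by omega),
        pvGetPfx cs ((jn : ℤ)) (by omega) (by omega)]
    simp only [Int.toNat_natCast]
    by_cases hc : pvPref cs m = pvPref cs jn
    · rw [if_pos hc, pvmod_add]
      congr 1
      rw [Finset.sum_range_succ, if_pos hc]
      ring
    · rw [if_neg hc, Finset.sum_range_succ, if_neg hc, add_zero]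

lemma pvFoldB (cs : List Char) (m : ℕ) (hm : m ≤ cs.length) :
    (PySem.List.pyRange 1 ((m : Int) + 1) 1).foldl
        (fun answer j => pvInnerB ((List.range (cs.length + 1)).map (pvPref cs)) (cs.length : Int) j answer) 0
      = PySem.Int.mod (pvSB cs m) (10 ^ 9 + 7) := by
  induction m with
  | zero =>
    rw [PySem.List.pyRange_one_eq_nil (by norm_num)]
    simp [pvSB]
  | succ m ih =>
    have hcast : ((m + 1 : ℕ) : ℤ) + 1 = ((m : ℤ) + 1) + 1 := by push_cast; ring
    rw [hcast, PySem.List.pyRange_one_succ_right (by omega), List.foldl_append,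
        ih (le_of_lt hm)]
    simp only [List.foldl_cons, List.foldl_nil]
    have h0 : (0 : ℤ) < (m : ℤ) + 1 := by omega
    have hj : (m : ℤ) + 1 ≤ (cs.length : Int) := by omega
    rw [pvInner_eq cs ((m : ℤ) + 1) h0 hj (pvSB cs m)]
    have ht : ((m : ℤ) + 1).toNat = m + 1 := by omega
    rw [ht, pvSB_succ]

lemma pvB_eq (seq : String) :
    evaluate_sequence_alt seq = PySem.Int.mod (pvSB seq.toList seq.toList.length) (10 ^ 9 + 7) := by
  unfold evaluate_sequence_alt
  have hpfx := pvFoldPfx seq.toList seq.toList.length le_rfl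
  rw [List.take_length] at hpfx
  simp only [hpfx]
  exact pvFoldB seq.toList seq.toList.length le_rfl

lemma pvS_eq_pvSB (cs : List Char) (k : ℕ) : pvS cs k = pvSB cs k := by
  unfold pvS pvSB
  apply Finset.sum_congr rfl
  intro j _
  have hnj : (cs.length : Int) - ((j : Int) + 1) + 1 = (cs.length : Int) - j := by ring
  rw [hnj, pvW, Finset.mul_sum]
  apply Finset.sum_congr rfl
  intro i _
  split_ifs <;> ring

-- ===== VERDICT (by name: the statement is the Claim_ definition above) =====
theorem evaluate_sequence_spec : Claim_equal_evaluate_sequence := by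
  intro seq _
  unfold Spec_evaluate_sequence
  rw [pvA_eq, pvB_eq, pvS_eq_pvSB]
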